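-- pv_equiv track=rewrite | github.com/AnneJoJo/Algorithm | Structure/Array/zero_subarray.py | zero_subarray
-- ===== SOURCE A (Python) =====
-- def zero_subarray(arr):
--     if arr == [] or len(arr) == 0:
--         return True
--
--     # [1,1,5,8,3,-16]
--     #0 1 2 7 15 18 2
--     pos_sum = {}
--     pos_sum[-1] = 0
--     acc = 0
--     for i,v in enumerate(arr):
--         acc += v
--         if acc in pos_sum.values():
--             return True
--         else:
--             pos_sum[i] = acc
--
--     return False
-- ===== SOURCE B (Python) =====
-- def zero_subarray(arr):
--     prefixes = [0]
--     acc = 0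
--     for v in arr:
--         acc += v
--         prefixes.append(acc)
--     prefixes = sorted(prefixes)
--     return any(a == b for a, b in zip(prefixes, prefixes[1:]))
-- ===== Notes on version B (the rewrite author's own statement) =====
-- stated objective: faster
-- what changed: Replaces A's incremental scan-of-previous-prefix-sums loop (early return on a repeat) by a staged sort-based duplicate check: build the full list of prefix sums, sort it, and scan adjacent pairs for equality; correct because a zero-sum subarray exists iff two prefix sums coincide.
-- intended difference: On the empty list A returns True although it contains no (nonempty) zero-sum subarray; B returns False, the intended answer for 'does a zero-sum subarray exist'. — e.g. on zero_subarray([]): A returns true, B returns false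
import Mathlib
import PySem

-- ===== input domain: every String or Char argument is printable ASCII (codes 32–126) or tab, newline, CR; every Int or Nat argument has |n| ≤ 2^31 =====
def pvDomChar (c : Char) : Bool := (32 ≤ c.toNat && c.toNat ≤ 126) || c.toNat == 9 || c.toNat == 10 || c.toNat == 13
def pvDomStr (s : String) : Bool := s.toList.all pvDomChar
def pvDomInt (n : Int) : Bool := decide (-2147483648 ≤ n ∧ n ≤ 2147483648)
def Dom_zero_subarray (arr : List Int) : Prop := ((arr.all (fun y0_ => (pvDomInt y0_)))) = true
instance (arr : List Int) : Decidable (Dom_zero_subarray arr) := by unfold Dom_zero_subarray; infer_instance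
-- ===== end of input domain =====

-- B replaces A's incremental loop (scan previous prefix sums at each step, early return) by a
-- staged sort-based duplicate check over the full prefix-sum list; B returns False on the empty
-- list where A returns True (stated as the intended difference D_ below).

-- ===== PORT A =====
def zsA_loop (d : PySem.Dict Int Int) (acc : Int) : List (Int × Int) → Bool
  | [] => false
  | (i, v) :: rest =>
    let acc' := acc + v
    if (PySem.Dict.values d).contains acc' then true
    else zsA_loop (PySem.Dict.insert d i acc') acc' rest

def zero_subarray (arr : List Int) : Bool :=
  if arr = [] ∨ arr.length = 0 then true
  else zsA_loop (PySem.Dict.insert PySem.Dict.empty (-1) 0) 0 (PySem.List.enumerate arr 0)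

-- ===== PORT B =====
-- any(a == b for a, b in zip(prefixes, prefixes[1:])): adjacent-pair scan
def zsB_any : List Int → Bool
  | a :: b :: t => a == b || zsB_any (b :: t)
  | _ => false

def zero_subarray_alt (arr : List Int) : Bool :=
  let st := arr.foldl (fun (st : List Int × Int) v => (st.1 ++ [st.2 + v], st.2 + v)) ([0], 0)
  zsB_any (PySem.List.sorted st.1 (fun x => x) false)

-- ===== PRECONDITION & SPEC =====
-- On the empty list A returns True although it contains no (nonempty) zero-sum subarray;
-- B returns False, the intended answer for 'does a zero-sum subarray exist'.
def D_zero_subarray (arr : List Int) : Prop := arr = []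
instance (arr : List Int) : Decidable (D_zero_subarray arr) := by unfold D_zero_subarray; infer_instance

def Spec_zero_subarray (arr : List Int) (out : Bool) : Prop := ¬ D_zero_subarray arr → out = zero_subarray_alt arr
instance (arr : List Int) (out : Bool) : Decidable (Spec_zero_subarray arr out) := by unfold Spec_zero_subarray; infer_instance

def pvDiffWitness_zero_subarray : List Int := []
def pvDiffWitnessOut_zero_subarray : Bool × Bool := (true, false)

-- ===== CLAIM =====
def Claim_unchanged_zero_subarray : Prop := ∀ (arr : List Int), Dom_zero_subarray arr → Spec_zero_subarray arr (zero_subarray arr)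
def Claim_changed_zero_subarray : Prop := Dom_zero_subarray (pvDiffWitness_zero_subarray) ∧ D_zero_subarray (pvDiffWitness_zero_subarray) ∧ zero_subarray (pvDiffWitness_zero_subarray) = pvDiffWitnessOut_zero_subarray.1 ∧ zero_subarray_alt (pvDiffWitness_zero_subarray) = pvDiffWitnessOut_zero_subarray.2 ∧ pvDiffWitnessOut_zero_subarray.1 ≠ pvDiffWitnessOut_zero_subarray.2
def Claim_exact_zero_subarray : Prop := ∀ (arr : List Int), Dom_zero_subarray arr → D_zero_subarray arr → zero_subarray arr ≠ zero_subarray_alt arr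

-- ===== LEMMAS AND PROOFS =====

-- prefix sums of l continuing from accumulator acc (not including acc itself)
def pvPrefixes (acc : Int) : List Int → List Int
  | [] => []
  | v :: rest => (acc + v) :: pvPrefixes (acc + v) rest

-- A's loop returns true iff the previously-seen values together with the remaining
-- prefix sums contain a duplicate.
lemma zsA_iff (l : List Int) : ∀ (n : Int) (d : PySem.Dict Int Int) (acc : Int),
    (∀ k ∈ d.keys, k < n) → (PySem.Dict.values d).Nodup →
    (zsA_loop d acc (PySem.List.enumerate l n) = true ↔
      ¬ ((PySem.Dict.values d) ++ pvPrefixes acc l).Nodup) := by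
  induction l with
  | nil =>
    intro n d acc _ hnd
    simp [PySem.List.enumerate_nil, zsA_loop, pvPrefixes, hnd]
  | cons v rest ih =>
    intro n d acc hk hnd
    rw [PySem.List.enumerate_cons]
    simp only [zsA_loop, pvPrefixes]
    by_cases hmem : (PySem.Dict.values d).contains (acc + v) = true
    · rw [if_pos hmem]
      have hin : (acc + v) ∈ PySem.Dict.values d := by simpa using hmem
      constructor
      · intro _ hnd
        rw [List.nodup_append] at hnd
        exact hnd.2.2 _ hin _ (List.mem_cons_self) rfl
      · intro _; rfl
    · rw [if_neg hmem]
      have hmemf : (acc + v) ∉ PySem.Dict.values d := by simpa using hmem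
      have hfresh : d.contains n = false := by
        rw [Bool.eq_false_iff]
        intro hc
        have hmemk : n ∈ d.keys := by
          rw [PySem.Dict.contains_iff_mem_keys] at hc
          exact hc
        have := hk n hmemk
        omega
      have hval : (PySem.Dict.insert d n (acc + v)).values = (PySem.Dict.values d) ++ [acc + v] := by
        have hitems := PySem.Dict.items_insert_of_not_contains (d := d) (k := n) (v := acc + v) hfresh
        simp [PySem.Dict.values, hitems]
      have hk' : ∀ k ∈ (PySem.Dict.insert d n (acc + v)).keys, k < n + 1 := by
        intro k hkmem
        rw [PySem.Dict.mem_keys_insert] at hkmem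
        rcases hkmem with h | h
        · omega
        · have := hk k h; omega
      have hnd' : ((PySem.Dict.insert d n (acc + v)).values).Nodup := by
        rw [hval]
        simp only [List.nodup_append, hnd, true_and]
        constructor
        · exact List.nodup_singleton _
        · intro a ha b hb
          simp only [List.mem_singleton] at hb
          subst hb
          intro h; exact hmemf (h ▸ ha)
      rw [ih (n + 1) _ (acc + v) hk' hnd', hval]
      have : (PySem.Dict.values d) ++ [acc + v] ++ pvPrefixes (acc + v) rest
           = (PySem.Dict.values d) ++ (acc + v) :: pvPrefixes (acc + v) rest := by
        simp
      rw [this]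

-- B's foldl builds the full prefix-sum list
lemma zsB_build (l : List Int) : ∀ (ps : List Int) (acc : Int),
    (l.foldl (fun (st : List Int × Int) v => (st.1 ++ [st.2 + v], st.2 + v)) (ps, acc)).1
      = ps ++ pvPrefixes acc l := by
  induction l with
  | nil => intro ps acc; simp [pvPrefixes]
  | cons v rest ih =>
    intro ps acc
    simp only [List.foldl_cons, pvPrefixes]
    rw [ih]
    simp

-- a list with no duplicates has no equal adjacent pair
lemma zsB_any_false_of_nodup : ∀ (l : List Int), l.Nodup → zsB_any l = false := by
  intro l
  induction l with
  | nil => intro _; rfl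
  | cons a t ih =>
    intro hnd
    match t, ih with
    | [], _ => rfl
    | b :: t', ih =>
      have hab : a ≠ b := by
        intro h; exact (List.nodup_cons.mp hnd).1 (h ▸ List.mem_cons_self)
      simp only [zsB_any]
      rw [ih (List.nodup_cons.mp hnd).2]
      simp [hab]

-- a (≤)-ordered list with no equal adjacent pair has no duplicates
lemma zsB_nodup_of_any_false : ∀ (l : List Int), l.Pairwise (· ≤ ·) → zsB_any l = false → l.Nodup := by
  intro l
  induction l with
  | nil => intro _ _; exact List.nodup_nil
  | cons a t ih =>
    intro hp hf
    match t, ih with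
    | [], _ => simp
    | b :: t', ih =>
      simp only [zsB_any, Bool.or_eq_false_iff] at hf
      have hab : a ≠ b := by
        intro h; rw [h] at hf; simp at hf
      have hp' := List.pairwise_cons.mp hp
      have hnd' := ih hp'.2 hf.2
      rw [List.nodup_cons]
      refine ⟨?_, hnd'⟩
      intro hmem
      have hlt : a < b := lt_of_le_of_ne (hp'.1 b List.mem_cons_self) hab
      rcases List.mem_cons.mp hmem with h | h
      · exact hab h
      · have hble : b ≤ a := (List.pairwise_cons.mp hp'.2).1 a h
        omega

-- adjacent-equality scan of the sorted list detects exactly the duplicates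
lemma zsB_sorted_iff (ps : List Int) :
    zsB_any (PySem.List.sorted ps (fun x => x) false) = true ↔ ¬ ps.Nodup := by
  have hperm : (PySem.List.sorted ps (fun x => x) false).Perm ps := PySem.List.sorted_perm ps _ _
  have hpw : (PySem.List.sorted ps (fun x => x) false).Pairwise (· ≤ ·) := by
    simpa using PySem.List.sorted_pairwise (xs := ps) (key := fun x => x)
  constructor
  · intro ht hnd
    have := zsB_any_false_of_nodup _ (hperm.nodup_iff.mpr hnd)
    rw [this] at ht; exact Bool.false_ne_true ht
  · intro hnd
    by_contra hne
    have hf : zsB_any (PySem.List.sorted ps (fun x => x) false) = false := by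
      cases h : zsB_any (PySem.List.sorted ps (fun x => x) false)
      · rfl
      · exact absurd h hne
    exact hnd (hperm.nodup_iff.mp (zsB_nodup_of_any_false _ hpw hf))

-- ===== VERDICT =====
theorem zero_subarray_spec : Claim_unchanged_zero_subarray := by
  intro arr _ hne
  unfold D_zero_subarray at hne
  show zero_subarray arr = zero_subarray_alt arr
  unfold zero_subarray zero_subarray_alt
  rw [if_neg (by simp [hne])]
  simp only []
  rw [Bool.eq_iff_iff]
  have hA := zsA_iff arr 0 (PySem.Dict.insert PySem.Dict.empty (-1) 0) 0
    (by intro k hk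
        have hkeys : (PySem.Dict.insert (PySem.Dict.empty (κ := Int) (ν := Int)) (-1) 0).keys = [-1] := rfl
        rw [hkeys] at hk
        simp at hk
        omega) (by decide)
  rw [hA]
  rw [zsB_build]
  rw [zsB_sorted_iff]
  have hvals : (PySem.Dict.insert (PySem.Dict.empty (κ := Int) (ν := Int)) (-1) 0).values = [0] := rfl
  rw [hvals]

theorem zero_subarray_changed : Claim_changed_zero_subarray := by
  unfold Claim_changed_zero_subarray; decide

theorem zero_subarray_tight : Claim_exact_zero_subarray := by
  intro arr _ hd
  subst hd
  decide
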